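-- pv_equiv track=rewrite | github.com/Majeda02/Triage_Medical_par_IA_avec_Chatbot | app.py | build_defaults_row
-- ===== SOURCE A (Python) =====
-- def build_defaults_row(expected_cols):
--     """
--     Build defaults that do NOT break categorical columns.
--     - start with None
--     - set boolean-like columns to "No" (strings) if they are in dataset as Yes/No
--     - set pain to "Unknown" if present
--     """
--     row = {c: None for c in expected_cols}
--
--     for c in expected_cols:
--         if c.startswith("is_patient_suffer_"):
--             row[c] = "No"
--
--     for b in ["is_arrival_ambulance", "is_patient_seen_before_72h", "patient_alchol_level"]:
--         if b in row and row[b] is None: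
--             row[b] = "No"
--
--     if "patient_pain_category" in row and row["patient_pain_category"] is None:
--         row["patient_pain_category"] = "Unknown"
--
--     return row
-- ===== SOURCE B (Python) =====
-- _OVERRIDES = {
--     "is_arrival_ambulance": "No",
--     "is_patient_seen_before_72h": "No",
--     "patient_alchol_level": "No",
--     "patient_pain_category": "Unknown",
-- }
--
--
-- def build_defaults_row(expected_cols):
--     items = []
--     seen = set()
--     for c in expected_cols:
--         if c not in seen:
--             seen.add(c)
--             items.append((c, "No" if c.startswith("is_patient_suffer_") else _OVERRIDES.get(c)))
--     return dict(items)
-- ===== Notes on version B (the rewrite author's own statement) =====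
-- stated objective: alternative
-- what changed: A builds a None-initialized dict and mutates it across three override passes; B never mutates a dict: it streams the columns once through an explicit seen-set, emitting deduplicated (column, value) pairs whose value comes from an override table (with one prefix rule), and materialises the dict from that pair list at the end.
import Mathlib
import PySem

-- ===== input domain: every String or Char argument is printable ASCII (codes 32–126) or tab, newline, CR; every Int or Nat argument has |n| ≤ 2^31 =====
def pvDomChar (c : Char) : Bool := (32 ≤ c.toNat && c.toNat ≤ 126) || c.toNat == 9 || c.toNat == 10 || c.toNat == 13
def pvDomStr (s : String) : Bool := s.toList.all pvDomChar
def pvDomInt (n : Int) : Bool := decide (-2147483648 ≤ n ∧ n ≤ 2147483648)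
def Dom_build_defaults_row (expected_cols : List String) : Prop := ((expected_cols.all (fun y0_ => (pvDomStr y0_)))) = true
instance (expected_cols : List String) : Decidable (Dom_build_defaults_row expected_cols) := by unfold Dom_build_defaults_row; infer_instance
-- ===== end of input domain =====

-- B replaces A's None-initialized dict mutated by three override passes with one streaming pass:
-- an explicit seen-set deduplicates the columns while (column, value) pairs are emitted from an
-- override table (plus one prefix rule), and the dict is materialised once from that pair list
-- (objective: alternative — no dict mutation, different data flow).

-- ===== PORT A =====
def build_defaults_row (expected_cols : List String) : List (String × Option String) :=
  let row : PySem.Dict String (Option String) :=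
    expected_cols.foldl (fun d c => d.insert c none) PySem.Dict.empty
  let row :=
    expected_cols.foldl
      (fun d c => if PySem.Str.startswith c "is_patient_suffer_" then d.insert c (some "No") else d)
      row
  let row :=
    ["is_arrival_ambulance", "is_patient_seen_before_72h", "patient_alchol_level"].foldl
      (fun d b => if d.contains b && (d.get? b == some none) then d.insert b (some "No") else d)
      row
  let row :=
    if row.contains "patient_pain_category" && (row.get? "patient_pain_category" == some none)
    then row.insert "patient_pain_category" (some "Unknown") else row
  row.items

-- ===== PORT B =====
def pvOverrides : PySem.Dict String String :=
  PySem.Dict.ofList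
    [("is_arrival_ambulance", "No"), ("is_patient_seen_before_72h", "No"),
     ("patient_alchol_level", "No"), ("patient_pain_category", "Unknown")]

-- loop body of Source B: skip already-seen columns, otherwise emit one (column, value) pair
def pvStep (acc : List (String × Option String) × PySem.Set String) (c : String) :
    List (String × Option String) × PySem.Set String :=
  if PySem.Set.contains acc.2 c then acc
  else (acc.1 ++ [(c, if PySem.Str.startswith c "is_patient_suffer_" then some "No"
                      else pvOverrides.get? c)],
        PySem.Set.add acc.2 c)

def build_defaults_row_alt (expected_cols : List String) : List (String × Option String) :=
  let st := expected_cols.foldl pvStep ([], PySem.Set.empty)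
  (PySem.Dict.ofList st.1).items

-- ===== PRECONDITION & SPEC =====
def Spec_build_defaults_row (expected_cols : List String) (out : List (String × Option String)) : Prop := out = build_defaults_row_alt expected_cols
instance (expected_cols : List String) (out : List (String × Option String)) : Decidable (Spec_build_defaults_row expected_cols out) := by unfold Spec_build_defaults_row; infer_instance

-- ===== CLAIM (what is proved, stated in full; the proofs are below) =====
def Claim_equal_build_defaults_row : Prop := ∀ (expected_cols : List String), Dom_build_defaults_row expected_cols → Spec_build_defaults_row expected_cols (build_defaults_row expected_cols)

-- ===== LEMMAS AND PROOFS =====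

-- the per-column value Source B emits (proof-side name for the expression inside pvStep)
def pvG (c : String) : Option String :=
  if PySem.Str.startswith c "is_patient_suffer_" then some "No" else pvOverrides.get? c

-- lookup after an unconditional insert loop whose value depends only on the key
lemma get?_foldl_insert_fun (g : String → Option String)
    (l : List String) (d : PySem.Dict String (Option String)) (k : String) :
    (l.foldl (fun d c => d.insert c (g c)) d).get? k =
      if k ∈ l then some (g k) else d.get? k := by
  induction l generalizing d with
  | nil => simp
  | cons c l ih =>
    simp only [List.foldl_cons, ih, List.mem_cons]
    by_cases hkl : k ∈ l
    · simp [hkl]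
    · by_cases hkc : k = c
      · subst hkc; simp [hkl, PySem.Dict.get?_insert_self]
      · simp [hkl, hkc, PySem.Dict.get?_insert_of_ne _ _ hkc]

-- lookup after a guarded insert loop whose guard and value depend only on the key
lemma get?_foldl_insert_if (p : String → Bool) (g : String → Option String)
    (l : List String) (d : PySem.Dict String (Option String)) (k : String) :
    (l.foldl (fun d c => if p c then d.insert c (g c) else d) d).get? k =
      if k ∈ l ∧ p k = true then some (g k) else d.get? k := by
  induction l generalizing d with
  | nil => simp
  | cons c l ih =>
    simp only [List.foldl_cons, ih, List.mem_cons]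
    by_cases hkA : (k = c ∨ k ∈ l) ∧ p k = true
    · rw [if_pos hkA]
      rcases hkA with ⟨hor, hpk⟩
      by_cases hkl : k ∈ l ∧ p k = true
      · rw [if_pos hkl]
      · have hkc : k = c := by
          rcases hor with h | h
          · exact h
          · exact absurd ⟨h, hpk⟩ hkl
        subst hkc
        rw [if_neg hkl, if_pos hpk, PySem.Dict.get?_insert_self]
    · have hkl' : ¬(k ∈ l ∧ p k = true) := fun h => hkA ⟨Or.inr h.1, h.2⟩
      rw [if_neg hkA, if_neg hkl']
      by_cases hp : p c
      · rw [if_pos hp]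
        by_cases hkc : k = c
        · subst hkc
          exact absurd ⟨Or.inl rfl, hp⟩ hkA
        · rw [PySem.Dict.get?_insert_of_ne _ _ hkc]
      · rw [if_neg hp]

-- one guarded-override step of A's second/third phase, on a dict whose lookups follow f
lemma get?_step (cols : List String) (d : PySem.Dict String (Option String))
    (f : String → Option String) (b : String) (w : Option String)
    (hd : ∀ k, d.get? k = if k ∈ cols then some (f k) else none) (k : String) :
    (if d.contains b && (d.get? b == some none) then d.insert b w else d).get? k =
      if k ∈ cols then some (if k = b ∧ f b = none then w else f k) else none := by
  have hcont : d.contains b = (d.get? b).isSome := PySem.Dict.contains_eq_isSome_get? d b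
  by_cases hb : b ∈ cols
  · by_cases hfb : f b = none
    · have hcond : (d.contains b && (d.get? b == some none)) = true := by
        rw [hcont, hd b]; simp [hb, hfb]
      rw [if_pos hcond]
      by_cases hkb : k = b
      · subst hkb; simp [PySem.Dict.get?_insert_self, hb, hfb]
      · rw [PySem.Dict.get?_insert_of_ne _ _ hkb, hd k]
        simp [hkb]
    · have hcond : (d.contains b && (d.get? b == some none)) = false := by
        rw [hcont, hd b]
        simp only [hb, if_true]
        simp [Option.isSome_iff_ne_none, hfb]
      rw [if_neg (by simp [hcond])]
      rw [hd k]
      by_cases hkb : k = b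
      · subst hkb; simp [hfb]
      · simp [hkb]
  · have hcond : (d.contains b && (d.get? b == some none)) = false := by
      rw [hcont, hd b]; simp [hb]
    rw [if_neg (by simp [hcond])]
    rw [hd k]
    by_cases hk : k ∈ cols
    · simp only [hk, if_true]
      have hkb : ¬(k = b ∧ f b = none) := fun h => hb (h.1 ▸ hk)
      simp [hkb]
    · simp [hk]

-- value functions after A's phases
def pvF1 (c : String) : Option String :=
  if PySem.Str.startswith c "is_patient_suffer_" then some "No" else none
def pvF2a (c : String) : Option String :=
  if c = "is_arrival_ambulance" ∧ pvF1 "is_arrival_ambulance" = none then some "No" else pvF1 c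
def pvF2b (c : String) : Option String :=
  if c = "is_patient_seen_before_72h" ∧ pvF2a "is_patient_seen_before_72h" = none then some "No" else pvF2a c
def pvF2c (c : String) : Option String :=
  if c = "patient_alchol_level" ∧ pvF2b "patient_alchol_level" = none then some "No" else pvF2b c
def pvF3 (c : String) : Option String :=
  if c = "patient_pain_category" ∧ pvF2c "patient_pain_category" = none then some "Unknown" else pvF2c c

-- A's layered value function equals B's table-driven one, column by column
lemma pvF3_eq_pvG (c : String) : pvF3 c = pvG c := by
  have hov : pvOverrides =
      ((((PySem.Dict.empty.insert "is_arrival_ambulance" "No").insert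
          "is_patient_seen_before_72h" "No").insert
          "patient_alchol_level" "No").insert
          "patient_pain_category" "Unknown") := by rfl
  by_cases h1 : c = "patient_pain_category"
  · subst h1; decide
  · by_cases h2 : c = "patient_alchol_level"
    · subst h2; decide
    · by_cases h3 : c = "is_patient_seen_before_72h"
      · subst h3; decide
      · by_cases h4 : c = "is_arrival_ambulance"
        · subst h4; decide
        · have hnone : pvOverrides.get? c = none := by
            rw [hov, PySem.Dict.get?_insert_of_ne _ _ h1,
              PySem.Dict.get?_insert_of_ne _ _ h2,
              PySem.Dict.get?_insert_of_ne _ _ h3,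
              PySem.Dict.get?_insert_of_ne _ _ h4,
              PySem.Dict.get?_empty]
          unfold pvF3 pvF2c pvF2b pvF2a pvF1 pvG
          simp [h1, h2, h3, h4, hnone]

-- names for A's intermediate dicts
def pvRow1 (cols : List String) : PySem.Dict String (Option String) :=
  cols.foldl
    (fun d c => if PySem.Str.startswith c "is_patient_suffer_" then d.insert c (some "No") else d)
    (cols.foldl (fun d c => d.insert c none) PySem.Dict.empty)
def pvRow2 (cols : List String) : PySem.Dict String (Option String) :=
  ["is_arrival_ambulance", "is_patient_seen_before_72h", "patient_alchol_level"].foldl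
    (fun d b => if d.contains b && (d.get? b == some none) then d.insert b (some "No") else d)
    (pvRow1 cols)
def pvRow3 (cols : List String) : PySem.Dict String (Option String) :=
  if (pvRow2 cols).contains "patient_pain_category" && ((pvRow2 cols).get? "patient_pain_category" == some none)
  then (pvRow2 cols).insert "patient_pain_category" (some "Unknown") else pvRow2 cols

lemma get?_pvRow1 (cols : List String) (k : String) :
    (pvRow1 cols).get? k = if k ∈ cols then some (pvF1 k) else none := by
  unfold pvRow1
  rw [get?_foldl_insert_if, get?_foldl_insert_fun]
  unfold pvF1
  by_cases hk : k ∈ cols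
  · simp only [hk, if_true, true_and]
    split_ifs <;> rfl
  · simp [hk, PySem.Dict.get?_empty]

lemma get?_pvRow2 (cols : List String) (k : String) :
    (pvRow2 cols).get? k = if k ∈ cols then some (pvF2c k) else none := by
  unfold pvRow2
  simp only [List.foldl_cons, List.foldl_nil]
  have h1 := get?_step cols _ pvF1 "is_arrival_ambulance" (some "No") (get?_pvRow1 cols)
  have h2 := get?_step cols _ pvF2a "is_patient_seen_before_72h" (some "No") (fun k => by rw [h1 k]; rfl)
  have h3 := get?_step cols _ pvF2b "patient_alchol_level" (some "No") (fun k => by rw [h2 k]; rfl)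
  rw [h3 k]; rfl

lemma get?_pvRow3 (cols : List String) (k : String) :
    (pvRow3 cols).get? k = if k ∈ cols then some (pvF3 k) else none := by
  unfold pvRow3
  have h := get?_step cols (pvRow2 cols) pvF2c "patient_pain_category" (some "Unknown")
    (get?_pvRow2 cols) k
  rw [h]; rfl

-- keys of A's dict stay the distinct columns through every phase
lemma keys_foldl_insert_if (p : String → Bool) (g : String → Option String)
    (l : List String) (d : PySem.Dict String (Option String))
    (hl : ∀ c ∈ l, d.contains c = true) :
    (l.foldl (fun d c => if p c then d.insert c (g c) else d) d).keys = d.keys := by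
  induction l generalizing d with
  | nil => simp
  | cons c l ih =>
    simp only [List.foldl_cons]
    by_cases hp : p c
    · rw [if_pos hp, ih]
      · exact PySem.Dict.keys_insert_of_contains _ _ (hl c (by simp))
      · intro c' hc'
        rw [PySem.Dict.contains_insert]
        simp [hl c' (List.mem_cons_of_mem _ hc')]
    · rw [if_neg hp]
      exact ih d (fun c' hc' => hl c' (List.mem_cons_of_mem _ hc'))

lemma keys_step (d : PySem.Dict String (Option String)) (b : String) (w : Option String) :
    (if d.contains b && (d.get? b == some none) then d.insert b w else d).keys = d.keys := by
  by_cases h : d.contains b && (d.get? b == some none)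
  · rw [if_pos h]
    exact PySem.Dict.keys_insert_of_contains _ _ (by
      rcases Bool.and_eq_true_iff.mp h with ⟨h1, _⟩; exact h1)
  · rw [if_neg h]

lemma keys_pvRow1 (cols : List String) :
    (pvRow1 cols).keys = PySem.List.dedup cols := by
  unfold pvRow1
  rw [keys_foldl_insert_if]
  · rw [PySem.Dict.keys_foldl_insert (f := fun _ _ => (none : Option String))]
    simp [PySem.Dict.keys_empty, PySem.Set.update_nil_left]
  · intro c hc
    rw [PySem.Dict.contains_eq_isSome_get?, get?_foldl_insert_fun]
    simp [hc]

lemma keys_pvRow3 (cols : List String) :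
    (pvRow3 cols).keys = PySem.List.dedup cols := by
  unfold pvRow3 pvRow2
  simp only [List.foldl_cons, List.foldl_nil]
  rw [keys_step, keys_step, keys_step, keys_step, keys_pvRow1]

lemma items_of_get?_keys (d : PySem.Dict String (Option String)) (f : String → Option String)
    (cols : List String)
    (hk : d.keys = PySem.List.dedup cols)
    (hg : ∀ k, d.get? k = if k ∈ cols then some (f k) else none) :
    d.items = (PySem.List.dedup cols).map (fun k => (k, f k)) := by
  have hnd : d.keys.Nodup := by rw [hk]; exact PySem.List.nodup_dedup cols
  rw [PySem.Dict.items_eq_map_keys d hnd none, hk]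
  apply List.map_congr_left
  intro k hkmem
  have hkc : k ∈ cols := (PySem.List.mem_dedup cols k).mp hkmem
  have : d.getD k none = f k := by
    rw [PySem.Dict.getD_eq_get?_getD, hg k]
    simp [hkc]
  rw [this]

-- B's streaming loop: from a seen-set s with its emitted pairs, it ends at the updated set
-- with exactly the pairs for the (deduplicated) union, in order
lemma fold_inv (cols : List String) (s : PySem.Set String) :
    cols.foldl pvStep (s.map (fun k => (k, pvG k)), s) =
      ((PySem.Set.update s cols).map (fun k => (k, pvG k)), PySem.Set.update s cols) := by
  induction cols generalizing s with
  | nil => simp [PySem.Set.update_nil]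
  | cons c cols ih =>
    simp only [List.foldl_cons]
    rw [PySem.Set.update_cons]
    by_cases h : PySem.Set.contains s c = true
    · have hstep : pvStep (s.map (fun k => (k, pvG k)), s) c = (s.map (fun k => (k, pvG k)), s) := by
        unfold pvStep; rw [if_pos h]
      have hadd : PySem.Set.add s c = s :=
        PySem.Set.add_of_mem ((PySem.Set.contains_iff s c).mp h)
      rw [hstep, hadd, ih s]
    · have hmem : c ∉ s := fun hc => h ((PySem.Set.contains_iff s c).mpr hc)
      have hadd : PySem.Set.add s c = s ++ [c] := PySem.Set.add_of_not_mem hmem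
      have hstep : pvStep (s.map (fun k => (k, pvG k)), s) c =
          ((PySem.Set.add s c).map (fun k => (k, pvG k)), PySem.Set.add s c) := by
        unfold pvStep
        rw [if_neg (by simpa using hmem), hadd]
        simp [pvG]
      rw [hstep, ih (PySem.Set.add s c)]

-- dict(items) over pairs with distinct keys has exactly those items
lemma items_ofList_of_nodup_fst (l : List (String × Option String))
    (h : (l.map Prod.fst).Nodup) :
    (PySem.Dict.ofList l).items = l := by
  have := PySem.Dict.items_foldl_insert_fresh (d := PySem.Dict.empty)
    (l := l) (k := Prod.fst) (v := Prod.snd)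
    (fun a _ => PySem.Dict.contains_empty a.1) h
  simpa using this

lemma build_eq (cols : List String) :
    build_defaults_row cols = build_defaults_row_alt cols := by
  have hA : build_defaults_row cols = (pvRow3 cols).items := rfl
  have hfold : cols.foldl pvStep ([], PySem.Set.empty) =
      (((PySem.Set.empty : PySem.Set String).update cols).map (fun k => (k, pvG k)),
        (PySem.Set.empty : PySem.Set String).update cols) :=
    fold_inv cols PySem.Set.empty
  have hB : build_defaults_row_alt cols =
      (PySem.Dict.ofList ((PySem.List.dedup cols).map (fun k => (k, pvG k)))).items := by
    show (PySem.Dict.ofList (cols.foldl pvStep ([], PySem.Set.empty)).1).items = _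
    rw [hfold, PySem.List.dedup_eq_ofList,
      show (PySem.Set.empty : PySem.Set String) = ([] : List String) from rfl,
      PySem.Set.update_nil_left]
  rw [hA, hB,
    items_of_get?_keys _ pvF3 cols (keys_pvRow3 cols) (get?_pvRow3 cols),
    items_ofList_of_nodup_fst]
  · exact List.map_congr_left (fun k _ => by rw [pvF3_eq_pvG k])
  · have hfst : (((PySem.List.dedup cols).map (fun k => (k, pvG k))).map Prod.fst)
        = PySem.List.dedup cols := by simp [Function.comp_def]
    rw [hfst]
    exact PySem.List.nodup_dedup cols

-- ===== VERDICT (by name: the statement is the Claim_ definition above) =====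
theorem build_defaults_row_spec : Claim_equal_build_defaults_row := by
  intro cols _
  unfold Spec_build_defaults_row
  exact build_eq cols
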